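-- pv_equiv track=rewrite | github.com/fgulan/PyOCR | src/text_image_v2.py | _get_hist_peaks
-- ===== SOURCE A (Python) =====
-- def _get_hist_peaks(hist, spaces):
--     size = len(hist)
--
--     if len(spaces) == 0:
--         return [(0, size)]
--
--     current_x = 0
--     hist_peaks = []
--     for space in spaces:
--         space_start_x, space_end_x = space
--         word = (current_x, space_start_x)
--         hist_peaks.append(word)
--         current_x = space_end_x
--
--     if current_x < size - 1:
--         word = (current_x, size - 1)
--         hist_peaks.append(word)
--
--     return hist_peaks
-- ===== SOURCE B (Python) =====
-- def _get_hist_peaks(hist, spaces):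
--     size = len(hist)
--     if not spaces:
--         return [(0, size)]
--
--     def words_from(current_x, rest):
--         if not rest:
--             return [(current_x, size - 1)] if current_x < size - 1 else []
--         space_start_x, space_end_x = rest[0]
--         return [(current_x, space_start_x)] + words_from(space_end_x, rest[1:])
--
--     return words_from(0, spaces)
-- ===== Notes on version B (the rewrite author's own statement) =====
-- stated objective: alternative
-- what changed: Replaces the iterative accumulator loop (threading current_x and appending to a result list, with a conditional trailing append after the loop) by a structural recursion on the space list that carries current_x and decides the trailing interval in its base case.
import Mathlib
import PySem

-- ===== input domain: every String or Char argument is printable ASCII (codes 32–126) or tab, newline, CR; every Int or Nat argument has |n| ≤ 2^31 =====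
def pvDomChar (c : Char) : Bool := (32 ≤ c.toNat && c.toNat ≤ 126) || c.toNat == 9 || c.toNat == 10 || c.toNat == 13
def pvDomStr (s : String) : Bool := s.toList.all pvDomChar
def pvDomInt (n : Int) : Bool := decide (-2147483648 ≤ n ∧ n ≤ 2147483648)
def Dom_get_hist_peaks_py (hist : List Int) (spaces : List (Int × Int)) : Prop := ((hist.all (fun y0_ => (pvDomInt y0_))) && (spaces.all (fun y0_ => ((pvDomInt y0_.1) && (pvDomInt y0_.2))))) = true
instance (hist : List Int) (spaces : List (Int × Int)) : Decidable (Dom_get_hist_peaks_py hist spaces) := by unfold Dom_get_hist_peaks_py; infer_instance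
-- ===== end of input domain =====

-- B replaces A's accumulator loop by a structural recursion on the space list carrying
-- current_x, with the conditional trailing interval decided in the base case (objective: alternative decomposition).


-- ===== PORT A =====
def get_hist_peaks_py (hist : List Int) (spaces : List (Int × Int)) : List (Int × Int) :=
  let size : Int := hist.length
  if spaces.length = 0 then [(0, size)]
  else
    let st := spaces.foldl
      (fun (st : Int × List (Int × Int)) space => (space.2, st.2 ++ [(st.1, space.1)]))
      (0, [])
    let current_x := st.1
    let hist_peaks := st.2
    if current_x < size - 1 then hist_peaks ++ [(current_x, size - 1)] else hist_peaks

-- ===== PORT B =====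
-- recursive helper words_from(current_x, rest) from Source B
def pvWordsFrom (size : Int) : Int → List (Int × Int) → List (Int × Int)
  | current_x, [] => if current_x < size - 1 then [(current_x, size - 1)] else []
  | current_x, (space_start_x, space_end_x) :: rest =>
      (current_x, space_start_x) :: pvWordsFrom size space_end_x rest

def get_hist_peaks_py_alt (hist : List Int) (spaces : List (Int × Int)) : List (Int × Int) :=
  let size : Int := hist.length
  if spaces.isEmpty then [(0, size)]
  else pvWordsFrom size 0 spaces

-- ===== PRECONDITION & SPEC =====
def Spec_get_hist_peaks_py (hist : List Int) (spaces : List (Int × Int)) (out : List (Int × Int)) : Prop := out = get_hist_peaks_py_alt hist spaces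
instance (hist : List Int) (spaces : List (Int × Int)) (out : List (Int × Int)) : Decidable (Spec_get_hist_peaks_py hist spaces out) := by unfold Spec_get_hist_peaks_py; infer_instance

-- ===== CLAIM (what is proved, stated in full; the proofs are below) =====
def Claim_equal_get_hist_peaks_py : Prop := ∀ (hist : List Int) (spaces : List (Int × Int)), Dom_get_hist_peaks_py hist spaces → Spec_get_hist_peaks_py hist spaces (get_hist_peaks_py hist spaces)

-- ===== LEMMAS AND PROOFS =====

-- A's loop followed by the conditional trailing append equals acc ++ B's recursion.
theorem loop_eq_rec (size : Int) (spaces : List (Int × Int)) :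
    ∀ (cx : Int) (acc : List (Int × Int)),
    (let st := spaces.foldl
        (fun (st : Int × List (Int × Int)) space => (space.2, st.2 ++ [(st.1, space.1)]))
        (cx, acc);
     if st.1 < size - 1 then st.2 ++ [(st.1, size - 1)] else st.2)
      = acc ++ pvWordsFrom size cx spaces := by
  induction spaces with
  | nil =>
      intro cx acc
      simp only [List.foldl_nil, pvWordsFrom]
      split <;> simp
  | cons sp tl ih =>
      intro cx acc
      obtain ⟨s, e⟩ := sp
      simp only [List.foldl_cons, pvWordsFrom]
      rw [ih e (acc ++ [(cx, s)])]
      simp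

-- ===== VERDICT (by name: the statement is the Claim_ definition above) =====
theorem get_hist_peaks_py_spec : Claim_equal_get_hist_peaks_py := by
  intro hist spaces _
  show get_hist_peaks_py hist spaces = get_hist_peaks_py_alt hist spaces
  unfold get_hist_peaks_py get_hist_peaks_py_alt
  cases spaces with
  | nil => simp
  | cons sp tl =>
      have h := loop_eq_rec (hist.length : Int) (sp :: tl) 0 []
      simpa using h
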